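-- pv_equiv track=rewrite | github.com/sxwxbxr/MultiScreenKiosk | kiosk_app/modules/utils/content_schedule.py | compute_slot_assignments
-- ===== SOURCE A (Python) =====
-- from typing import Callable, Dict, Iterable, List, Optional, Tuple
--
-- def compute_slot_assignments(
--     num_sources: int,
--     assignments: Dict[int, str],
--     name_to_index: Dict[str, int],
-- ) -> Tuple[List[int], List[Tuple[int, str, str]]]:
--     """Resolve the schedule mapping to concrete source indices.
--
--     Returns a tuple ``(indices, conflicts)`` where ``indices`` is a list mapping
--     each pane index to a source index, and ``conflicts`` describes entries that
--     could not be honoured exactly (unknown sources, duplicates, ...).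
--     """
--
--     if num_sources <= 0:
--         return [], []
--
--     indices: List[int] = list(range(num_sources))
--     conflicts: List[Tuple[int, str, str]] = []
--     used: Dict[int, int] = {}
--
--     def _next_free(excluded: Optional[int] = None) -> Optional[int]:
--         for candidate in range(num_sources):
--             if candidate == excluded:
--                 continue
--             if candidate not in used:
--                 return candidate
--         return None
--
--     for pane in range(num_sources):
--         name = assignments.get(pane)
--         chosen: Optional[int] = None
--         reason: Optional[str] = None
--
--         if name:
--             chosen = name_to_index.get(name)
--             if chosen is None:
--                 reason = "unknown source"
--         if chosen is None:
--             chosen = pane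
--
--         if chosen in used:
--             reason = reason or "source already in use"
--             fallback = _next_free()
--             if fallback is not None:
--                 chosen = fallback
--             else:
--                 chosen = pane
--
--         indices[pane] = chosen
--         used[chosen] = pane
--         if reason:
--             conflicts.append((pane, name or "", reason))
--
--     return indices, conflicts
-- ===== SOURCE B (Python) =====
-- def compute_slot_assignments(num_sources, assignments, name_to_index):
--     """Two staged passes instead of A's single loop with an inner rescan:
--     pass 1 resolves every pane's requested source up front; pass 2 settles
--     collisions with a used-set and a monotone pointer to the smallest free slot."""
--     if num_sources <= 0:
--         return [], []
--     # pass 1: what each pane asks for, before any collision handling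
--     wants = []
--     for pane in range(num_sources):
--         name = assignments.get(pane)
--         if name:
--             idx = name_to_index.get(name)
--             if idx is None:
--                 wants.append((pane, name, "unknown source"))
--             else:
--                 wants.append((idx, name, None))
--         else:
--             wants.append((pane, name, None))
--     # pass 2: settle collisions left to right
--     indices, conflicts = [], []
--     used, free = set(), 0
--     for pane, (want, name, reason) in enumerate(wants):
--         if want in used:
--             reason = reason or "source already in use"
--             while free in used:
--                 free += 1
--             want = free
--         used.add(want)
--         indices.append(want)
--         if reason:
--             conflicts.append((pane, name or "", reason))
--     return indices, conflicts
-- ===== Notes on version B (the rewrite author's own statement) =====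
-- stated objective: alternative
-- what changed: Replaces A's single loop with an inner per-conflict rescan of range(num_sources) by two staged passes: a first pass resolving every pane's requested source up front, then a settle pass over that list with a used-set and a monotone pointer to the smallest free slot.
import Mathlib
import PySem

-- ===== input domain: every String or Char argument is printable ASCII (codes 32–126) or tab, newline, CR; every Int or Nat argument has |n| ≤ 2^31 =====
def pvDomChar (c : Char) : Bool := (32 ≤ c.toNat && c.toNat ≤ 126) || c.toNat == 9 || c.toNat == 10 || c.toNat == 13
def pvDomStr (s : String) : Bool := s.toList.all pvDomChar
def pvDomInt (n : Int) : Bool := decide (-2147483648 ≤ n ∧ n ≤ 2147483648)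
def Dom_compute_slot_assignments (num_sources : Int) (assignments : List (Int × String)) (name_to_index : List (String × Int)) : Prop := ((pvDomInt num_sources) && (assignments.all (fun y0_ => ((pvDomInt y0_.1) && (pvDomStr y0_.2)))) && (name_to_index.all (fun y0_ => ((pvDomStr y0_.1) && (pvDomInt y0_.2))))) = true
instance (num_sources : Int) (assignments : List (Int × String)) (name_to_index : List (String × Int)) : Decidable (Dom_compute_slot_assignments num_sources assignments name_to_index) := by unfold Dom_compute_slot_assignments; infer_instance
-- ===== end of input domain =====

-- B splits A's single loop (with its inner free-slot rescan) into two staged passes: a map resolving every pane's request, then a recursive settle pass with a used-set and a monotone free pointer (alternative algorithm, same value).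


-- ===== PORT A =====
-- `_next_free`'s scan over range(num_sources): skip `excluded`, return first candidate not in `used`
def nextFreeLoop (used : PySem.Dict Int Int) (excluded : Option Int) : List Int → Option Int
  | [] => none
  | c :: rest =>
      if some c = excluded then nextFreeLoop used excluded rest
      else if PySem.Dict.contains used c then nextFreeLoop used excluded rest
      else some c

def nextFreeA (num_sources : Int) (used : PySem.Dict Int Int) (excluded : Option Int) : Option Int :=
  nextFreeLoop used excluded (PySem.List.pyRange 0 num_sources 1)

-- one iteration of A's `for pane in range(num_sources)` loop; state = (indices, conflicts, used)
def stepA (A : PySem.Dict Int String) (N : PySem.Dict String Int) (num_sources : Int)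
    (st : List Int × List (Int × String × String) × PySem.Dict Int Int) (pane : Int) :
    List Int × List (Int × String × String) × PySem.Dict Int Int :=
  let indices := st.1
  let conflicts := st.2.1
  let used := st.2.2
  let name : Option String := PySem.Dict.get? A pane
  -- `if name:` block: (chosen : Option Int, reason : Option String)
  let cr : Option Int × Option String :=
    if (name.getD "") ≠ "" then
      match PySem.Dict.get? N (name.getD "") with
      | some i => (some i, none)
      | none => (none, some "unknown source")
    else (none, none)
  let chosen : Int := cr.1.getD pane       -- `if chosen is None: chosen = pane`
  let cr2 : Int × Option String :=
    if PySem.Dict.contains used chosen then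
      let reason := cr.2.getD "source already in use"
      match nextFreeA num_sources used none with
      | some f => (f, some reason)
      | none => (pane, some reason)
    else (chosen, cr.2)
  let indices2 := PySem.List.pySetD indices pane cr2.1   -- indices[pane] = chosen (pane always in range)
  let used2 := PySem.Dict.insert used cr2.1 pane
  let conflicts2 := match cr2.2 with
    | some r => conflicts ++ [(pane, name.getD "", r)]   -- `name or ""` (a None/"" name becomes "")
    | none => conflicts
  (indices2, conflicts2, used2)

def compute_slot_assignments (num_sources : Int) (assignments : List (Int × String)) (name_to_index : List (String × Int)) : List Int × (List (Int × String × String)) :=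
  if num_sources ≤ 0 then ([], [])
  else
    let A := PySem.Dict.ofList assignments
    let N := PySem.Dict.ofList name_to_index
    let st := (PySem.List.pyRange 0 num_sources 1).foldl (stepA A N num_sources)
      (PySem.List.pyRange 0 num_sources 1, [], PySem.Dict.empty)
    (st.1, st.2.1)

-- ===== PORT B =====
-- pass 1: (want, name, reason) for one pane — what it asks for, before collisions
def resolveWant (A : PySem.Dict Int String) (N : PySem.Dict String Int) (pane : Int) :
    Int × Option String × Option String :=
  let name := PySem.Dict.get? A pane
  if (name.getD "") ≠ "" then
    match PySem.Dict.get? N (name.getD "") with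
    | some i => (i, name, none)
    | none => (pane, name, some "unknown source")
  else (pane, name, none)

-- `while free in used: free += 1`; fuel = num_sources.toNat always suffices
def advanceFree (used : PySem.Set Int) : Nat → Int → Int
  | 0, free => free
  | fuel + 1, free => if PySem.Set.contains used free then advanceFree used fuel (free + 1) else free

-- pass 2: settle collisions left to right (the Python loop, transcribed as recursion on `wants`)
def settle (num_sources : Int) :
    List (Int × Option String × Option String) → Int → PySem.Set Int → Int →
    List Int × List (Int × String × String)
  | [], _, _, _ => ([], [])
  | (want, name, reason) :: rest, pane, used, free =>
      let wf : Int × Option String × Int :=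
        if PySem.Set.contains used want then
          let f := advanceFree used num_sources.toNat free
          (f, some (reason.getD "source already in use"), f)
        else (want, reason, free)
      let tail := settle num_sources rest (pane + 1) (PySem.Set.add used wf.1) wf.2.2
      (wf.1 :: tail.1,
       match wf.2.1 with
       | some r => (pane, name.getD "", r) :: tail.2
       | none => tail.2)

def compute_slot_assignments_alt (num_sources : Int) (assignments : List (Int × String)) (name_to_index : List (String × Int)) : List Int × (List (Int × String × String)) :=
  if num_sources ≤ 0 then ([], [])
  else
    let A := PySem.Dict.ofList assignments
    let N := PySem.Dict.ofList name_to_index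
    let wants := (PySem.List.pyRange 0 num_sources 1).map (resolveWant A N)
    settle num_sources wants 0 PySem.Set.empty 0

-- ===== PRECONDITION & SPEC =====
def Spec_compute_slot_assignments (num_sources : Int) (assignments : List (Int × String)) (name_to_index : List (String × Int)) (out : List Int × (List (Int × String × String))) : Prop := out = compute_slot_assignments_alt num_sources assignments name_to_index
instance (num_sources : Int) (assignments : List (Int × String)) (name_to_index : List (String × Int)) (out : List Int × (List (Int × String × String))) : Decidable (Spec_compute_slot_assignments num_sources assignments name_to_index out) := by unfold Spec_compute_slot_assignments; infer_instance

-- ===== CLAIM (what is proved, stated in full; the proofs are below) =====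
def Claim_equal_compute_slot_assignments : Prop := ∀ (num_sources : Int) (assignments : List (Int × String)) (name_to_index : List (String × Int)), Dom_compute_slot_assignments num_sources assignments name_to_index → Spec_compute_slot_assignments num_sources assignments name_to_index (compute_slot_assignments num_sources assignments name_to_index)

-- ===== LEMMAS AND PROOFS =====

theorem advanceFree_spec (used : PySem.Set Int) (fuel : Nat) : ∀ (free f : Int), free ≤ f →
    PySem.Set.contains used f = false →
    (∀ j : Int, free ≤ j → j < f → PySem.Set.contains used j = true) →
    f - free ≤ (fuel : Int) →
    advanceFree used fuel free = f := by
  induction fuel with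
  | zero => intro free f h1 _ _ h4; simp only [advanceFree]; omega
  | succ n ih =>
    intro free f h1 h2 h3 h4
    rcases eq_or_lt_of_le h1 with rfl | hlt
    · simp only [advanceFree, h2, Bool.false_eq_true, if_false]
    · have hc : PySem.Set.contains used free = true := h3 free le_rfl hlt
      simp only [advanceFree, hc, if_true]
      exact ih (free + 1) f (by omega) h2 (fun j hj => h3 j (by omega)) (by push_cast at h4 ⊢; omega)

theorem nextFreeLoop_spec (used : PySem.Dict Int Int) (n f : Int) (hf : f < n)
    (hnot : PySem.Dict.contains used f = false) (M : Nat) : ∀ (a : Int), (f - a).toNat = M → a ≤ f →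
    (∀ j : Int, a ≤ j → j < f → PySem.Dict.contains used j = true) →
    nextFreeLoop used none (PySem.List.pyRange a n 1) = some f := by
  induction M with
  | zero =>
    intro a hM ha hall
    have : a = f := by omega
    subst this
    rw [PySem.List.pyRange_one_cons (by omega)]
    simp [nextFreeLoop, hnot]
  | succ m ih =>
    intro a hM ha hall
    rw [PySem.List.pyRange_one_cons (by omega)]
    have hc : PySem.Dict.contains used a = true := hall a le_rfl (by omega)
    simp only [nextFreeLoop, hc, if_true, reduceCtorEq, if_false]
    exact ih (a + 1) (by omega) (by omega) (fun j hj => hall j (by omega))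

theorem exists_not_mem (s : List Int) (k : Nat) (hlen : s.length = k) :
    ∃ m : Nat, (m : Int) ∉ s ∧ m ≤ k := by
  by_contra h
  have hall : ∀ m : Nat, m ≤ k → (m : Int) ∈ s := by
    intro m hm
    by_contra hmn
    exact h ⟨m, hmn, hm⟩
  have hsub : ((List.range (k+1)).map (fun i : Nat => (i : Int))) ⊆ s := by
    intro x hx
    rw [List.mem_map] at hx
    obtain ⟨i, hi, rfl⟩ := hx
    exact hall i (by simpa using Nat.lt_succ_iff.mp (List.mem_range.mp hi))
  have hnd' : ((List.range (k+1)).map (fun i : Nat => (i : Int))).Nodup :=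
    List.Nodup.map (fun a b hab => by omega) (List.nodup_range)
  have := List.Subperm.length_le (List.subperm_of_subset hnd' hsub)
  simp [hlen] at this

-- one pane: A's step and B's settle-head compute the same chosen index, conflict entry and invariants
theorem step_agree (A : PySem.Dict Int String) (N : PySem.Dict String Int) (n : Int)
    (k : Nat) (hkn : (k : Int) < n)
    (idxB : List Int) (rest : List Int) (conf : List (Int × String × String))
    (usedA : PySem.Dict Int Int) (usedB : PySem.Set Int) (free : Int)
    (hkeys : usedB = PySem.Dict.keys usedA)
    (hlen : usedB.length = k)
    (hidx : idxB.length = k)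
    (hfree0 : 0 ≤ free)
    (hfreeinv : ∀ j : Int, 0 ≤ j → j < free → j ∈ usedB) :
    ∃ (c : Int) (rOpt : Option String) (free' : Int),
      stepA A N n (idxB ++ (k : Int) :: rest, conf, usedA) (k : Int)
          = (idxB ++ c :: rest,
             (match rOpt with
              | some r => conf ++ [((k : Int), (PySem.Dict.get? A (k : Int)).getD "", r)]
              | none => conf),
             PySem.Dict.insert usedA c (k : Int)) ∧
      ((if PySem.Set.contains usedB (resolveWant A N (k : Int)).1 then
          let f := advanceFree usedB n.toNat free
          (f, some ((resolveWant A N (k : Int)).2.2.getD "source already in use"), f)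
        else ((resolveWant A N (k : Int)).1, (resolveWant A N (k : Int)).2.2, free))
        : Int × Option String × Int) = (c, rOpt, free') ∧
      PySem.Set.add usedB c = PySem.Dict.keys (PySem.Dict.insert usedA c (k : Int)) ∧
      (PySem.Set.add usedB c).length = k + 1 ∧
      0 ≤ free' ∧ (∀ j : Int, 0 ≤ j → j < free' → j ∈ PySem.Set.add usedB c) := by
  have hcontA : ∀ x : Int, PySem.Dict.contains usedA x = PySem.Set.contains usedB x := by
    intro x
    rw [hkeys, PySem.Dict.contains_eq_decide_mem_keys, PySem.Set.contains_eq_listContains]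
    simp
  set name : Option String := PySem.Dict.get? A (k : Int) with hname
  set crA : Option Int × Option String :=
    (if (name.getD "") ≠ "" then
      match PySem.Dict.get? N (name.getD "") with
      | some i => (some i, none)
      | none => (none, some "unknown source")
    else (none, none)) with hcrA
  have hrw : resolveWant A N (k : Int) = (crA.1.getD (k : Int), name, crA.2) := by
    rw [resolveWant, hcrA, ← hname]
    split_ifs with h
    · cases PySem.Dict.get? N (name.getD "") <;> rfl
    · rfl
  set chosen : Int := crA.1.getD (k : Int) with hchosen
  have hset : PySem.List.pySetD (idxB ++ (k : Int) :: rest) (k : Int) = fun c => idxB ++ c :: rest := by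
    funext c
    rw [PySem.List.pySetD_natCast, ← hidx]
    simp
  by_cases hc : PySem.Set.contains usedB chosen = true
  · -- collision: chosen already used
    obtain ⟨mm, hmmn, hmml⟩ := exists_not_mem usedB k hlen
    have hfreemm : free ≤ (mm : Int) := by
      by_contra hlt
      exact hmmn (hfreeinv mm (by positivity) (by omega))
    have hex : ∃ t : Nat, PySem.Set.contains usedB (free + (t : Int)) = false := by
      refine ⟨(mm - free).toNat, ?_⟩
      have : free + ((mm - free).toNat : Int) = (mm : Int) := by omega
      rw [this]
      exact (Bool.not_eq_true _).mp (fun hmem => hmmn ((PySem.Set.contains_iff _ _).mp hmem))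
    set t := Nat.find hex with ht
    set f := free + (t : Int) with hf
    have hfnot : PySem.Set.contains usedB f = false := Nat.find_spec hex
    have hfmin : ∀ j : Int, free ≤ j → j < f → PySem.Set.contains usedB j = true := by
      intro j h1 h2
      have hj : j = free + ((j - free).toNat : Int) := by omega
      have hlt : (j - free).toNat < t := by omega
      have := Nat.find_min hex hlt
      rw [hj]
      exact Bool.not_eq_false _ |>.mp (by rw [← hj] at this ⊢; exact fun hfalse => this (by rw [hj] at hfalse ⊢; exact hfalse))
    have hfmm : f ≤ (mm : Int) := by
      have : t ≤ (mm - free).toNat := Nat.find_min' hex (by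
        have : free + (((mm : Int) - free).toNat : Int) = (mm : Int) := by omega
        rw [this]
        exact (Bool.not_eq_true _).mp (fun hmem => hmmn ((PySem.Set.contains_iff _ _).mp hmem)))
      omega
    have hfn : f < n := by omega
    have hf0 : 0 ≤ f := by omega
    have hfninA : PySem.Dict.contains usedA f = false := by rw [hcontA]; exact hfnot
    have hnf : nextFreeA n usedA none = some f := by
      rw [nextFreeA]
      refine nextFreeLoop_spec usedA n f hfn hfninA f.toNat 0 (by omega) (by omega) ?_
      intro j h1 h2
      rw [hcontA]
      by_cases hjf : j < free
      · exact (PySem.Set.contains_iff _ _).mpr (hfreeinv j h1 hjf)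
      · exact hfmin j (by omega) h2
    have hadv : advanceFree usedB n.toNat free = f := by
      refine advanceFree_spec usedB n.toNat free f (by omega) hfnot hfmin (by omega)
    have hcA : PySem.Dict.contains usedA chosen = true := by rw [hcontA]; exact hc
    have hfninB : f ∉ usedB := by
      intro hm
      have h2 := (PySem.Set.contains_iff usedB f).mpr hm
      rw [hfnot] at h2
      exact Bool.false_ne_true h2
    refine ⟨f, some (crA.2.getD "source already in use"), f, ?_, ?_, ?_, ?_, hf0, ?_⟩
    · simp only [stepA, ← hname, ← hcrA, ← hchosen, hcA, if_true, hnf, hset]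
    · simp only [hrw, hc, if_true, hadv]
    · rw [PySem.Set.add_of_not_mem hfninB, PySem.Dict.keys_insert_of_not_contains _ _ hfninA, ← hkeys]
    · rw [PySem.Set.add_of_not_mem hfninB]; simp [hlen]
    · intro j h1 h2
      rw [PySem.Set.add_of_not_mem hfninB]
      by_cases hjf : j < free
      · exact List.mem_append_left _ (hfreeinv j h1 hjf)
      · exact List.mem_append_left _ ((PySem.Set.contains_iff _ _).mp (hfmin j (by omega) h2))
  · -- chosen is fresh
    have hcB : PySem.Set.contains usedB chosen = false := by simpa using hc
    have hcA : PySem.Dict.contains usedA chosen = false := by rw [hcontA]; exact hcB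
    have hnin : chosen ∉ usedB := by
      intro hm
      have h2 := (PySem.Set.contains_iff usedB chosen).mpr hm
      rw [hcB] at h2
      exact Bool.false_ne_true h2
    refine ⟨chosen, crA.2, free, ?_, ?_, ?_, ?_, hfree0, ?_⟩
    · simp only [stepA, ← hname, ← hcrA, ← hchosen, hcA, Bool.false_eq_true, if_false, hset]
    · simp only [hrw, hcB, Bool.false_eq_true, if_false]
    · rw [PySem.Set.add_of_not_mem hnin, PySem.Dict.keys_insert_of_not_contains _ _ hcA, ← hkeys]
    · rw [PySem.Set.add_of_not_mem hnin]; simp [hlen]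
    · intro j h1 h2
      rw [PySem.Set.add_of_not_mem hnin]
      exact List.mem_append_left _ (hfreeinv j h1 h2)

theorem loop_agree (A : PySem.Dict Int String) (N : PySem.Dict String Int) (n : Int)
    (m : Nat) : ∀ (k : Nat), (k : Int) + (m : Int) = n →
    ∀ (idxB : List Int) (conf : List (Int × String × String)) (usedA : PySem.Dict Int Int)
      (usedB : PySem.Set Int) (free : Int),
    usedB = PySem.Dict.keys usedA →
    usedB.length = k →
    idxB.length = k →
    0 ≤ free →
    (∀ j : Int, 0 ≤ j → j < free → j ∈ usedB) →
    ((PySem.List.pyRange (k : Int) n 1).foldl (stepA A N n)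
        (idxB ++ PySem.List.pyRange (k : Int) n 1, conf, usedA)).1
      = idxB ++ (settle n ((PySem.List.pyRange (k : Int) n 1).map (resolveWant A N)) (k : Int) usedB free).1
    ∧ ((PySem.List.pyRange (k : Int) n 1).foldl (stepA A N n)
        (idxB ++ PySem.List.pyRange (k : Int) n 1, conf, usedA)).2.1
      = conf ++ (settle n ((PySem.List.pyRange (k : Int) n 1).map (resolveWant A N)) (k : Int) usedB free).2 := by
  induction m with
  | zero =>
    intro k hk idxB conf usedA usedB free _ _ _ _ _
    rw [PySem.List.pyRange_one_eq_nil (by omega)]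
    simp [settle]
  | succ m ih =>
    intro k hk idxB conf usedA usedB free hkeys hlen hidx hfree0 hfreeinv
    have hkn : (k : Int) < n := by push_cast at hk ⊢; omega
    obtain ⟨c, rOpt, free', hA, hB, hkeys', hlen', hfree0', hfreeinv'⟩ :=
      step_agree A N n k hkn idxB (PySem.List.pyRange ((k : Int) + 1) n 1) conf usedA usedB free
        hkeys hlen hidx hfree0 hfreeinv
    rw [PySem.List.pyRange_one_cons hkn]
    simp only [List.foldl_cons, List.map_cons, hA]
    rw [settle]
    rw [hB]
    have hcast : ((k : Int) + 1) = ((k + 1 : Nat) : Int) := by push_cast; ring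
    have happ : idxB ++ c :: PySem.List.pyRange ((k : Int) + 1) n 1
        = (idxB ++ [c]) ++ PySem.List.pyRange ((k : Int) + 1) n 1 := by simp
    rw [happ, hcast]
    cases rOpt with
    | none =>
      have hih := ih (k + 1) (by push_cast at hk ⊢; omega) (idxB ++ [c]) conf
        (PySem.Dict.insert usedA c (k : Int)) (PySem.Set.add usedB c) free'
        (by rw [hkeys']) hlen' (by simp [hidx]) hfree0' hfreeinv'
      refine ⟨?_, ?_⟩
      · simp only [hih.1]; simp
      · simp only [hih.2]
    | some r =>
      have hname : (resolveWant A N (k : Int)).2.1 = PySem.Dict.get? A (k : Int) := by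
        rw [resolveWant]
        split_ifs with h
        · cases PySem.Dict.get? N ((PySem.Dict.get? A (k : Int)).getD "") <;> rfl
        · rfl
      have hih := ih (k + 1) (by push_cast at hk ⊢; omega) (idxB ++ [c])
        (conf ++ [((k : Int), (PySem.Dict.get? A (k : Int)).getD "", r)])
        (PySem.Dict.insert usedA c (k : Int)) (PySem.Set.add usedB c) free'
        (by rw [hkeys']) hlen' (by simp [hidx]) hfree0' hfreeinv'
      refine ⟨?_, ?_⟩
      · simp only [hih.1]; simp
      · simp only [hih.2, hname]; simp

-- ===== VERDICT (by name: the statement is the Claim_ definition above) =====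
theorem compute_slot_assignments_spec : Claim_equal_compute_slot_assignments := by
  intro n asg nti _
  unfold Spec_compute_slot_assignments compute_slot_assignments compute_slot_assignments_alt
  by_cases hn : n ≤ 0
  · simp [hn]
  · simp only [hn, if_false]
    have h := loop_agree (PySem.Dict.ofList asg) (PySem.Dict.ofList nti) n n.toNat 0 (by omega)
      [] [] PySem.Dict.empty PySem.Set.empty 0 (by rfl) rfl rfl le_rfl (by intro j h1 h2; omega)
    simp only [Nat.cast_zero, List.nil_append] at h
    exact Prod.ext h.1 h.2
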